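-- pv_equiv track=rewrite | github.com/itspratham/Python-tutorial | Python_Contents/Caw Studios/prg1.py | check_the_String
-- ===== SOURCE A (Python) =====
-- def check_the_String(stringg, i):
--     if len(stringg) == 0:
--         return ""
--     elif len(stringg) == 1:
--         return stringg
--     else:
--         while i < len(stringg) - 1:
--             if stringg[i].isupper() or stringg[i + 1].isupper():
--                 if len(stringg) == 0 or len(stringg) == 1:
--                     return stringg
--                 stringg = stringg[:i] + stringg[i + 2:]
--                 check_the_String(stringg, 0)
--             else:
--                 pass
--             i = i + 1
--         else:
--             return stringg
-- ===== SOURCE B (Python) =====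
-- def check_the_String(stringg, i):
--     # Single left-to-right pass over the fixed input with an accumulator,
--     # instead of repeatedly rebuilding the string by slicing.
--     if len(stringg) == 0:
--         return ""
--     if len(stringg) == 1:
--         return stringg
--     n = len(stringg)
--     result = list(stringg[:i])
--     k = i
--     while k < n - 1:
--         if stringg[k].isupper() or stringg[k + 1].isupper():
--             if k + 2 < n:
--                 result.append(stringg[k + 2])
--             k += 3
--         else:
--             result.append(stringg[k])
--             k += 1
--     if k == n - 1:
--         result.append(stringg[k])
--     return ''.join(result)
-- ===== Notes on version B (the rewrite author's own statement) =====
-- stated objective: alternative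
-- what changed: A repeatedly rebuilds the whole string with slice concatenations while scanning a pointer over the mutating string; B makes one left-to-right pass over the fixed input, appending kept characters to an accumulator (skipping the two spliced characters and keeping the one after them) and joining once at the end.
-- outside the precondition, e.g. on check_the_String('AB', -2): A returns '', B returns 'AB'
import Mathlib
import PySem

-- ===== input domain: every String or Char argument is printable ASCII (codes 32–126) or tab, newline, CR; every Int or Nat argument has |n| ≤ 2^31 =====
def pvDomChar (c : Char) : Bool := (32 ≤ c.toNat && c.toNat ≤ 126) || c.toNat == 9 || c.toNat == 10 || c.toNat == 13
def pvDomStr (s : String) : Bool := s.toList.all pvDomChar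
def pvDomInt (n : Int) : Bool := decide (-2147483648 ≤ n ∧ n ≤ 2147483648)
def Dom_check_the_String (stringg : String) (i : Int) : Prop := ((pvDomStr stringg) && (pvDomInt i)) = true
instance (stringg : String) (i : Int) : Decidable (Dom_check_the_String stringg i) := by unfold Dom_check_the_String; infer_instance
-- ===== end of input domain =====

-- B replaces A's repeated slice-and-rebuild loop over a mutating string by a single
-- left-to-right accumulating pass over the fixed input string (objective: alternative single-pass algorithm, same measured cost).

-- ===== PORT A =====
-- A's while loop: i increments each iteration; on an uppercase at i or i+1 the two chars
-- stringg[i], stringg[i+1] are spliced out (stringg[:i] + stringg[i+2:]).  The recursive call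
-- 'check_the_String(stringg, 0)' in A discards its result and the function is pure, so it has
-- no effect; it is noted here and not executed.  The loop is made total with fuel
-- (2*len + 2, enough for every input on which the Python A returns normally; on exhaustion the
-- current string is returned — unreachable under Pre_).
def checkLoopA (fuel : Nat) (s : List Char) (i : Int) : List Char :=
  match fuel with
  | 0 => s
  | fuel + 1 =>
    if i < (s.length : Int) - 1 then
      match PySem.List.pyGet? s i, PySem.List.pyGet? s (i + 1) with
      | some c1, some c2 =>
        if PySem.Chars.isupper c1 || PySem.Chars.isupper c2 then
          checkLoopA fuel (PySem.List.slice s none (some i) ++ PySem.List.slice s (some (i + 2)) none) (i + 1)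
        else
          checkLoopA fuel s (i + 1)
      | _, _ => s  -- Python raises IndexError here (i < -len); outside Pre_
    else s

def check_the_String (stringg : String) (i : Int) : String :=
  if stringg.toList.length = 0 then ""
  else if stringg.toList.length = 1 then stringg
  else String.ofList (checkLoopA (2 * stringg.toList.length + 2) stringg.toList i)

-- ===== PORT B =====
-- B's while loop: pointer k over the FIXED string s (n = len(s)), accumulator acc ('result');
-- returns the final (result, k); the 'if k == n - 1: result.append(s[k])' tail follows in _alt.
def checkLoopB (s : List Char) (n : Int) (acc : List Char) (k : Int) : List Char × Int :=
  if _h : k < n - 1 then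
    match PySem.List.pyGet? s k, PySem.List.pyGet? s (k + 1) with
    | some c1, some c2 =>
      if PySem.Chars.isupper c1 || PySem.Chars.isupper c2 then
        checkLoopB s n (match PySem.List.pyGet? s (k + 2) with
                        | some c3 => if k + 2 < n then acc ++ [c3] else acc
                        | none => acc) (k + 3)
      else
        checkLoopB s n (acc ++ [c1]) (k + 1)
    | _, _ => (acc, k)  -- Python raises IndexError here (k < -len); outside Pre_
  else (acc, k)
termination_by (n - k).toNat
decreasing_by all_goals omega

def check_the_String_alt (stringg : String) (i : Int) : String :=
  if stringg.toList.length = 0 then ""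
  else if stringg.toList.length = 1 then stringg
  else
    if (checkLoopB stringg.toList (stringg.toList.length : Int) (PySem.List.slice stringg.toList none (some i)) i).2 = (stringg.toList.length : Int) - 1 then
      String.ofList ((checkLoopB stringg.toList (stringg.toList.length : Int) (PySem.List.slice stringg.toList none (some i)) i).1 ++
        (match PySem.List.pyGet? stringg.toList (checkLoopB stringg.toList (stringg.toList.length : Int) (PySem.List.slice stringg.toList none (some i)) i).2 with
         | some c => [c] | none => []))
    else String.ofList (checkLoopB stringg.toList (stringg.toList.length : Int) (PySem.List.slice stringg.toList none (some i)) i).1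

-- ===== PRECONDITION & SPEC =====
-- Pre_ excludes negative starting indices i on strings of length ≥ 2: an unspecified corner where
-- Python's negative-index wraparound gives each implementation an accidental, different splicing
-- behaviour (and where A raises IndexError once i < -len); no caller would specify either value.
def Pre_check_the_String (stringg : String) (i : Int) : Prop :=
  0 ≤ i ∨ stringg.toList.length ≤ 1
instance (stringg : String) (i : Int) : Decidable (Pre_check_the_String stringg i) := by
  unfold Pre_check_the_String; infer_instance

def pvWitness_check_the_String : String × Int := ("aBcDe", 0)

def Spec_check_the_String (stringg : String) (i : Int) (out : String) : Prop := out = check_the_String_alt stringg i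
instance (stringg : String) (i : Int) (out : String) : Decidable (Spec_check_the_String stringg i out) := by unfold Spec_check_the_String; infer_instance

-- ===== CLAIM (what is proved, stated in full; the proofs are below) =====
def Claim_equal_check_the_String : Prop := ∀ (stringg : String) (i : Int), Dom_check_the_String stringg i → Pre_check_the_String stringg i → Spec_check_the_String stringg i (check_the_String stringg i)

-- ===== LEMMAS AND PROOFS =====

theorem checkLoopA_stop (f : Nat) (s : List Char) (i : Int) (h : (s.length : Int) - 1 ≤ i) :
    checkLoopA f s i = s := by
  cases f with
  | zero => rfl
  | succ f => unfold checkLoopA; rw [if_neg (by omega)]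

-- B's tail step after the loop, as a function of the loop's result (proof helper)
def bFinish (orig : List Char) (r : List Char × Int) : List Char :=
  if r.2 = (orig.length : Int) - 1 then
    r.1 ++ (match PySem.List.pyGet? orig r.2 with | some c => [c] | none => [])
  else r.1

-- Main invariant: A's state (acc ++ orig.drop k, |acc|) corresponds to B's state (acc, k).
theorem checkLoop_agree (orig : List Char) (fuel : Nat) :
    ∀ (k : Int) (acc : List Char), 0 ≤ k →
      (orig.length : Int) - k + 1 ≤ fuel →
      checkLoopA fuel (acc ++ orig.drop k.toNat) (acc.length : Int) =
        bFinish orig (checkLoopB orig (orig.length : Int) acc k) := by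
  induction fuel with
  | zero =>
    intro k acc hk hf
    have hge : orig.length ≤ k.toNat := by omega
    rw [List.drop_of_length_le hge, List.append_nil]
    rw [checkLoopB, dif_neg (by omega)]
    unfold bFinish
    rw [if_neg (by simp; omega)]
    rfl
  | succ f ih =>
    intro k acc hk hf
    by_cases hcond : k < (orig.length : Int) - 1
    · -- loop body runs
      have hkn : k.toNat < orig.length := by omega
      have hkn1 : k.toNat + 1 < orig.length := by omega
      have hdrop : orig.drop k.toNat = orig[k.toNat] :: orig.drop (k.toNat + 1) :=
        List.drop_eq_getElem_cons hkn
      have hdrop1 : orig.drop (k.toNat + 1) = orig[k.toNat + 1] :: orig.drop (k.toNat + 2) :=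
        List.drop_eq_getElem_cons hkn1
      have hlen : (acc ++ orig.drop k.toNat).length = acc.length + (orig.length - k.toNat) := by
        simp [List.length_drop]
      have hcondA : (acc.length : Int) < ((acc ++ orig.drop k.toNat).length : Int) - 1 := by
        rw [hlen]; push_cast; omega
      have hget1 : PySem.List.pyGet? (acc ++ orig.drop k.toNat) (acc.length : Int)
          = some orig[k.toNat] := by
        rw [hdrop]; exact PySem.List.pyGet?_append_length _ _ _
      have hget2 : PySem.List.pyGet? (acc ++ orig.drop k.toNat) ((acc.length : Int) + 1)
          = some orig[k.toNat + 1] := by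
        rw [hdrop, hdrop1]
        have : acc ++ orig[k.toNat] :: orig[k.toNat + 1] :: orig.drop (k.toNat + 2)
            = (acc ++ [orig[k.toNat]]) ++ orig[k.toNat + 1] :: orig.drop (k.toNat + 2) := by
          simp
        rw [this]
        have h2 : ((acc.length : Int) + 1) = ((acc ++ [orig[k.toNat]]).length : Int) := by
          simp
        rw [h2]
        exact PySem.List.pyGet?_append_length _ _ _
      have hbget1 : PySem.List.pyGet? orig k = some orig[k.toNat] :=
        PySem.List.pyGet?_eq_some_getElem orig hk (by omega)
      have hbget2 : PySem.List.pyGet? orig (k + 1) = some orig[k.toNat + 1] := by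
        have h := PySem.List.pyGet?_eq_some_getElem orig (i := k + 1) (by omega) (by omega)
        simpa [show (k + 1).toNat = k.toNat + 1 from by omega] using h
      unfold checkLoopA
      rw [if_pos hcondA, hget1, hget2]
      rw [checkLoopB, dif_pos hcond, hbget1, hbget2]
      dsimp only
      by_cases hup : (PySem.Chars.isupper orig[k.toNat] || PySem.Chars.isupper orig[k.toNat + 1]) = true
      · rw [if_pos hup, if_pos hup]
        -- A splices: slice to acc.length = acc; slice from acc.length+2 = drop (k+2)
        have hsl1 : PySem.List.slice (acc ++ orig.drop k.toNat) none (some (acc.length : Int))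
            = acc := by
          rw [PySem.List.slice_to _ (Int.natCast_nonneg _)]
          simp
        have hsl2 : PySem.List.slice (acc ++ orig.drop k.toNat) (some ((acc.length : Int) + 2)) none
            = orig.drop (k.toNat + 2) := by
          rw [PySem.List.slice_from _ (by omega : (0:Int) ≤ (acc.length : Int) + 2)]
          have : ((acc.length : Int) + 2).toNat = acc.length + 2 := by omega
          rw [this]
          simp [List.drop_append, List.drop_drop]
        rw [hsl1, hsl2]
        by_cases hk2 : k + 2 < (orig.length : Int)
        · -- kept char orig[k+2]
          have hk2n : k.toNat + 2 < orig.length := by omega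
          have hbget3 : PySem.List.pyGet? orig (k + 2) = some orig[k.toNat + 2] := by
            have hg := PySem.List.pyGet?_eq_some_getElem (i := k + 2) orig (by omega) hk2
            simpa [show ((k : Int) + 2).toNat = k.toNat + 2 from by omega] using hg
          rw [hbget3]
          dsimp only
          rw [if_pos hk2]
          have hdrop2 : orig.drop (k.toNat + 2) = orig[k.toNat + 2] :: orig.drop (k.toNat + 3) :=
            List.drop_eq_getElem_cons hk2n
          have hst : acc ++ orig.drop (k.toNat + 2)
              = (acc ++ [orig[k.toNat + 2]]) ++ orig.drop (k + 3).toNat := by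
            rw [show (k + 3).toNat = k.toNat + 3 from by omega, hdrop2]; simp
          rw [hst]
          have hlen' : ((acc.length : Int) + 1) = (((acc ++ [orig[k.toNat + 2]]).length : Int)) := by
            simp
          rw [hlen']
          have hfu : (orig.length : Int) - (k + 3) + 1 ≤ (f : Int) := by omega
          exact ih (k + 3) _ (by omega) hfu
        · -- k+2 beyond the end: both sides stop with acc
          have hnone : PySem.List.pyGet? orig (k + 2) = none := by
            rw [PySem.List.pyGet?_eq_none_iff orig (k+2)]
            unfold PySem.Raise.InRange
            omega
          rw [hnone]
          have hde : orig.drop (k.toNat + 2) = [] := List.drop_of_length_le (by omega)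
          rw [hde, List.append_nil]
          rw [checkLoopA_stop _ _ _ (by omega)]
          rw [checkLoopB, dif_neg (by omega)]
          unfold bFinish
          rw [if_neg (by simp; omega)]
      · rw [if_neg hup, if_neg hup]
        have hst : acc ++ orig.drop k.toNat
            = (acc ++ [orig[k.toNat]]) ++ orig.drop (k + 1).toNat := by
          rw [show (k + 1).toNat = k.toNat + 1 from by omega, hdrop]; simp
        rw [hst]
        have hlen' : ((acc.length : Int) + 1) = (((acc ++ [orig[k.toNat]]).length : Int)) := by
          simp
        rw [hlen']
        have hfu : (orig.length : Int) - (k + 1) + 1 ≤ (f : Int) := by omega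
        exact ih (k + 1) _ (by omega) hfu
    · -- loop does not run: A returns acc ++ drop k; B returns (acc, k) plus the tail step
      unfold checkLoopA
      rw [if_neg (by simp [List.length_drop]; omega)]
      rw [checkLoopB, dif_neg hcond]
      unfold bFinish
      by_cases hend : k = (orig.length : Int) - 1
      · rw [if_pos (by simpa using hend)]
        have hkn : k.toNat = orig.length - 1 := by omega
        have hlt : k.toNat < orig.length := by omega
        have : PySem.List.pyGet? orig k = some orig[k.toNat] :=
          PySem.List.pyGet?_eq_some_getElem orig hk (by omega)
        rw [this]
        rw [List.drop_eq_getElem_cons hlt, List.drop_of_length_le (by omega)]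
      · rw [if_neg (by simpa using hend)]
        rw [List.drop_of_length_le (by omega), List.append_nil]

theorem check_the_String_agree (stringg : String) (i : Int)
    (hPre : 0 ≤ i ∨ stringg.toList.length ≤ 1) :
    check_the_String stringg i = check_the_String_alt stringg i := by
  unfold check_the_String check_the_String_alt
  by_cases h0 : stringg.toList.length = 0
  · rw [if_pos h0, if_pos h0]
  · rw [if_neg h0, if_neg h0]
    by_cases h1 : stringg.toList.length = 1
    · rw [if_pos h1, if_pos h1]
    · rw [if_neg h1, if_neg h1]
      have hi : 0 ≤ i := by
        cases hPre with
        | inl h => exact h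
        | inr h => omega
      set s := stringg.toList with hs
      by_cases hbig : (s.length : Int) < i
      · -- i past the end: both sides return the whole string
        rw [checkLoopA_stop _ _ _ (by omega)]
        rw [PySem.List.slice_to _ hi, List.take_of_length_le (by omega)]
        rw [checkLoopB, dif_neg (by omega)]
        rw [if_neg (by simp; omega)]
      · -- 0 ≤ i ≤ len: apply the loop invariant with acc = take i, k = i
        have hle : i.toNat ≤ s.length := by omega
        have hsplit : s = s.take i.toNat ++ s.drop i.toNat := (List.take_append_drop _ _).symm
        have hlen : ((s.take i.toNat).length : Int) = i := by
          simp [List.length_take]; omega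
        rw [PySem.List.slice_to _ hi]
        have hmain := checkLoop_agree s (2 * s.length + 2) i (s.take i.toNat) hi (by omega)
        rw [← hsplit, hlen] at hmain
        rw [hmain, bFinish, apply_ite String.ofList]

-- ===== VERDICT (by name: the statement is the Claim_ definition above) =====
theorem check_the_String_spec : Claim_equal_check_the_String := by
  intro stringg i _hDom hPre
  unfold Spec_check_the_String
  exact check_the_String_agree stringg i hPre
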